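-- pv_equiv track=rewrite | github.com/Rpharaud/SOC-Lab-OnPrem | phases/02-tls-hardening/soc/legacy-import/enrich_v2.py | score_passivedns
-- ===== SOURCE A (Python) =====
-- def score_passivedns(passivedns_data):
--     score = 0
--     tags = []
--     all_entries = []
--
--     for source, entries in passivedns_data.items():
--         if entries and isinstance(entries, list):
--             all_entries.extend(entries)
--
--     if all_entries:
--         score += 3  # general signal of resolution activity
--
--         if any("tor" in e or "dark" in e for e in all_entries):
--             score += 2
--             tags.append("tor_related_dns")
--
--         if len(all_entries) > 5:
--             score += 2
--             tags.append("fast_flux_candidate")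
--
--         if any("wallet" in e for e in all_entries):
--             tags.append("wallet_related_dns")
--     else:
--         score -= 1  # no resolution history at all
--
--     return score, tags
-- ===== SOURCE B (Python) =====
-- def score_passivedns(passivedns_data):
--     # Single pass: count entries and track the two flags; no intermediate all_entries list.
--     n = 0
--     tor = False
--     wallet = False
--     for entries in passivedns_data.values():
--         if entries and isinstance(entries, list):
--             n += len(entries)
--             for e in entries:
--                 tor = tor or ("tor" in e or "dark" in e)
--                 wallet = wallet or ("wallet" in e)
--     if n == 0:
--         return -1, []
--     score = 3
--     tags = []
--     if tor:
--         score += 2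
--         tags.append("tor_related_dns")
--     if n > 5:
--         score += 2
--         tags.append("fast_flux_candidate")
--     if wallet:
--         tags.append("wallet_related_dns")
--     return score, tags
-- ===== Notes on version B (the rewrite author's own statement) =====
-- stated objective: alternative
-- what changed: B replaces A's materialized all_entries list and its three separate scans (two any() passes and a len) by a single pass over the dict values that maintains an entry count and the tor/wallet flags, then assembles score and tags from those three accumulators.
import Mathlib
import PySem

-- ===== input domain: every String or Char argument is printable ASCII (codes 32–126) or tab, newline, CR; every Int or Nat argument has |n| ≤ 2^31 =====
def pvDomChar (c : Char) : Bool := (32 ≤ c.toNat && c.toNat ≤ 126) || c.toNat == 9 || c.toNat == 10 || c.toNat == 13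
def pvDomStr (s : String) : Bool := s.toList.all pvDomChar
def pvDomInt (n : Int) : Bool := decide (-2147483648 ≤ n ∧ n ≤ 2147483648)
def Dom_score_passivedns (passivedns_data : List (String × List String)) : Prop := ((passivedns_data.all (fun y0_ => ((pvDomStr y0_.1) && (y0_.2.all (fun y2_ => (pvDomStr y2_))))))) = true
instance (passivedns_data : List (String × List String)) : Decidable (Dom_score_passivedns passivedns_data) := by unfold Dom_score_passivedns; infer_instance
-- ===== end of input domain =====

-- B replaces A's intermediate all_entries list and its three scans by one pass that
-- keeps a count and the two flags (objective: alternative decomposition, same cost).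

-- ===== PORT A =====
def score_passivedns (passivedns_data : List (String × List String)) : Int × List String :=
  -- all_entries built by the first loop ('if entries and isinstance(entries, list)')
  let all_entries := passivedns_data.foldl
    (fun acc p => if !p.2.isEmpty then acc ++ p.2 else acc) []
  if !all_entries.isEmpty then
    let score : Int := 0 + 3
    let tags : List String := []
    let st :=
      if all_entries.any (fun e => PySem.Str.isIn "tor" e || PySem.Str.isIn "dark" e)
      then (score + 2, tags ++ ["tor_related_dns"]) else (score, tags)
    let st :=
      if all_entries.length > 5
      then (st.1 + 2, st.2 ++ ["fast_flux_candidate"]) else st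
    let st :=
      if all_entries.any (fun e => PySem.Str.isIn "wallet" e)
      then (st.1, st.2 ++ ["wallet_related_dns"]) else st
    st
  else (0 - 1, [])

-- ===== PORT B =====
def score_passivedns_alt (passivedns_data : List (String × List String)) : Int × List String :=
  -- one pass: (n, tor, wallet)
  let st := passivedns_data.foldl
    (fun (st : Nat × Bool × Bool) p =>
      if !p.2.isEmpty then
        p.2.foldl
          (fun (st : Nat × Bool × Bool) e =>
            (st.1, st.2.1 || (PySem.Str.isIn "tor" e || PySem.Str.isIn "dark" e),
                   st.2.2 || PySem.Str.isIn "wallet" e))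
          (st.1 + p.2.length, st.2.1, st.2.2)
      else st)
    (0, false, false)
  if st.1 = 0 then (-1, [])
  else
    let score : Int := 3
    let tags : List String := []
    let st2 := if st.2.1 then (score + 2, tags ++ ["tor_related_dns"]) else (score, tags)
    let st2 := if st.1 > 5 then (st2.1 + 2, st2.2 ++ ["fast_flux_candidate"]) else st2
    let st2 := if st.2.2 then (st2.1, st2.2 ++ ["wallet_related_dns"]) else st2
    st2

-- ===== PRECONDITION & SPEC =====
def Spec_score_passivedns (passivedns_data : List (String × List String)) (out : Int × List String) : Prop := out = score_passivedns_alt passivedns_data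
instance (passivedns_data : List (String × List String)) (out : Int × List String) : Decidable (Spec_score_passivedns passivedns_data out) := by unfold Spec_score_passivedns; infer_instance

-- ===== CLAIM (what is proved, stated in full; the proofs are below) =====
def Claim_equal_score_passivedns : Prop := ∀ (passivedns_data : List (String × List String)), Dom_score_passivedns passivedns_data → Spec_score_passivedns passivedns_data (score_passivedns passivedns_data)

-- ===== LEMMAS AND PROOFS =====

def pvTor (e : String) : Bool := PySem.Str.isIn "tor" e || PySem.Str.isIn "dark" e
def pvWal (e : String) : Bool := PySem.Str.isIn "wallet" e

theorem pvA_fold (d : List (String × List String)) (acc : List String) :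
    d.foldl (fun acc p => if !p.2.isEmpty then acc ++ p.2 else acc) acc
      = acc ++ d.flatMap Prod.snd := by
  induction d generalizing acc with
  | nil => simp
  | cons hd tl ih =>
    simp only [List.foldl_cons, List.flatMap_cons]
    by_cases h : hd.2 = []
    · rw [if_neg (by simp [h]), ih, h, List.nil_append]
    · rw [if_pos (by simp [h]), ih, List.append_assoc]

theorem pvB_inner (es : List String) (n : Nat) (t w : Bool) :
    es.foldl (fun (st : Nat × Bool × Bool) e =>
        (st.1, st.2.1 || (PySem.Str.isIn "tor" e || PySem.Str.isIn "dark" e),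
               st.2.2 || PySem.Str.isIn "wallet" e)) (n, t, w)
      = (n, t || es.any pvTor, w || es.any pvWal) := by
  induction es generalizing t w with
  | nil => simp
  | cons hd tl ih =>
    rw [List.foldl_cons]
    show _ = _
    rw [ih]
    simp only [List.any_cons, pvTor, pvWal, Bool.or_assoc]

theorem pvB_fold (d : List (String × List String)) (n : Nat) (t w : Bool) :
    d.foldl (fun (st : Nat × Bool × Bool) p =>
      if !p.2.isEmpty then
        p.2.foldl
          (fun (st : Nat × Bool × Bool) e =>
            (st.1, st.2.1 || (PySem.Str.isIn "tor" e || PySem.Str.isIn "dark" e),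
                   st.2.2 || PySem.Str.isIn "wallet" e))
          (st.1 + p.2.length, st.2.1, st.2.2)
      else st) (n, t, w)
      = (n + (d.flatMap Prod.snd).length,
         t || (d.flatMap Prod.snd).any pvTor,
         w || (d.flatMap Prod.snd).any pvWal) := by
  induction d generalizing n t w with
  | nil => simp
  | cons hd tl ih =>
    simp only [List.foldl_cons, List.flatMap_cons]
    by_cases h : hd.2 = []
    · rw [if_neg (by simp [h]), ih, h]
      simp
    · rw [if_pos (by simp [h]), pvB_inner, ih]
      simp only [List.any_append, List.length_append, Bool.or_assoc, Nat.add_assoc]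

theorem score_passivedns_spec : Claim_equal_score_passivedns := by
  intro d _
  unfold Spec_score_passivedns score_passivedns score_passivedns_alt
  simp only [pvA_fold, pvB_fold, List.nil_append, Nat.zero_add, Bool.false_or]
  by_cases h : d.flatMap Prod.snd = []
  · rw [if_neg (by simp [h]), if_pos (by simp [h])]
    norm_num
  · have hne : (d.flatMap Prod.snd).length ≠ 0 := by
      rw [Ne, List.length_eq_zero_iff]; exact h
    rw [if_pos (by simp [h]), if_neg hne]
    unfold pvTor pvWal
    norm_num
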